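-- pv_equiv track=rewrite | github.com/DAEUN9/TIL | ifif/python/S2_1411.py | check
-- ===== SOURCE A (Python) =====
-- def check(a, b):
--     d = dict()
--     length = len(a)
--     for l in range(length):
--         if a[l] != b[l]:
--             if d.get(a[l], 0) == 0:
--                 b = b.replace(b[l], a[l])
--                 d[a[l]] = 1
--             else:
--                 return False
--         else:
--             d[a[l]] = 1
--     if a == b:
--         return True
--     return False
-- ===== SOURCE B (Python) =====
-- def check(a, b):
--     # Union-find over characters: each class of b's original characters shows one
--     # current letter; A's str.replace becomes an O(1) union instead of rebuilding b.
--     if len(a) != len(b):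
--         return False
--     first = {}                       # first occurrence index of each letter of a
--     for i, c in enumerate(a):
--         if c not in first:
--             first[c] = i
--     parent = {}                      # union-find forest (roots are absent keys)
--     val = {}                         # root -> letter its class currently shows (default: itself)
--     owner = {}                       # letter -> root of the class showing it (default: itself; None = extinct)
--
--     def find(c):
--         while parent.get(c, c) != c:
--             c = parent[c]
--         return c
--
--     for i in range(len(a)):
--         want = a[i]
--         r = find(b[i])
--         cur = val.get(r, r)
--         if cur == want:
--             continue
--         if first[want] < i:          # 'want' already claimed earlier
--             return False
--         owner[cur] = None            # letter cur disappears
--         t = owner.get(want, want)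
--         if t is None:                # no class shows 'want': just relabel r
--             val[r] = want
--             owner[want] = r
--         else:                        # merge r into the class showing 'want'
--             parent[r] = t
--             owner[want] = t
--     for x, c in zip(a, b):
--         if val.get(find(c), find(c)) != x:
--             return False
--     return True
-- ===== Notes on version B (the rewrite author's own statement) =====
-- stated objective: alternative
-- what changed: B replaces A's repeated whole-string str.replace simulation by a union-find over characters (classes of b's original letters labelled with their current letter; each replace is an O(1) union/relabel), with a precomputed first-occurrence table instead of A's running dict and an up-front length check, then verifies positionwise over zip(a,b).
-- outside the precondition, e.g. on check('abaZ', 'bab'): A returns False, B returns False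
import Mathlib
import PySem

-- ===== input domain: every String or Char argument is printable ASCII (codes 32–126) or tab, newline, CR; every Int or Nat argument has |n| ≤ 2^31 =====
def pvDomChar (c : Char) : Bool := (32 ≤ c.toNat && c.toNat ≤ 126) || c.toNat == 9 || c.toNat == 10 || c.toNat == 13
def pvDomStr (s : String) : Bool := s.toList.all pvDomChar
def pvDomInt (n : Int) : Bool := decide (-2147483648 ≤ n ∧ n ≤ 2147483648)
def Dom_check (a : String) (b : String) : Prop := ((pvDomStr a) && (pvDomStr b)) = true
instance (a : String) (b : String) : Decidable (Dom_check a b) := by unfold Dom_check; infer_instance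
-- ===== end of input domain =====

-- B replaces A's repeated whole-string str.replace by a union-find over characters
-- (classes of b's original letters labelled with their current letter), with a
-- precomputed first-occurrence table and a positionwise final check.

-- ===== PORT A =====
-- the loop 'for l in range(length)' with early return False; b is rebuilt by str.replace
def checkGo (a : List Char) (b : List Char) (d : PySem.Dict Char Int) : List Int → Bool
  | [] => a == b
  | l :: rest =>
    match PySem.List.pyGet? a l with
    | none => false   -- unreachable: l comes from range(len(a))
    | some ca =>
      match PySem.List.pyGet? b l with
      | none => false   -- b[l] raises IndexError; excluded by Pre_check
      | some cb =>
        if ca ≠ cb then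
          if d.getD ca 0 == 0 then
            checkGo a (PySem.Chars.replace b [cb] [ca]) (d.insert ca 1) rest
          else false
        else checkGo a b (d.insert ca 1) rest

def check (a : String) (b : String) : Bool :=
  checkGo a.toList b.toList PySem.Dict.empty (PySem.List.pyRange 0 a.toList.length 1)

-- ===== PORT B =====
-- find's while loop, ported with fuel parent.size+1: parent is an acyclic forest whose
-- chains pass through distinct keys of parent, so that fuel is exact for reachable states
def findFuel : Nat → PySem.Dict Char Char → Char → Char
  | 0, _, c => c
  | n+1, p, c => if p.getD c c = c then c else findFuel n p (p.getD c c)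

def ufFind (p : PySem.Dict Char Char) (c : Char) : Char := findFuel (p.size + 1) p c

-- 'for i, c in enumerate(a): if c not in first: first[c] = i'
def firstDict (a : List Char) : PySem.Dict Char Int :=
  (PySem.List.enumerate a).foldl
    (fun d p => if d.contains p.2 then d else d.insert p.2 p.1) PySem.Dict.empty

def altGo (a b : List Char) (first : PySem.Dict Char Int) :
    PySem.Dict Char Char → PySem.Dict Char Char → PySem.Dict Char (Option Char) → List Int → Bool
  | parent, val, _owner, [] =>
      (a.zip b).all (fun p => val.getD (ufFind parent p.2) (ufFind parent p.2) == p.1)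
  | parent, val, owner, i :: rest =>
    match PySem.List.pyGet? a i with
    | none => false   -- unreachable: i comes from range(len(a))
    | some want =>
      match PySem.List.pyGet? b i with
      | none => false  -- unreachable: len(b) = len(a) was checked up front
      | some bc =>
        let r := ufFind parent bc
        let cur := val.getD r r
        if cur = want then altGo a b first parent val owner rest
        else
          match first.get? want with
          | none => false  -- unreachable: want = a[i] is a key of first
          | some j =>
            if j < i then false
            else
              let owner1 := owner.insert cur none
              match owner1.getD want (some want) with
              | none => altGo a b first parent (val.insert r want) (owner1.insert want (some r)) rest
              | some t => altGo a b first (parent.insert r t) val (owner1.insert want (some t)) rest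

def check_alt (a : String) (b : String) : Bool :=
  if a.toList.length ≠ b.toList.length then false
  else altGo a.toList b.toList (firstDict a.toList)
        PySem.Dict.empty PySem.Dict.empty PySem.Dict.empty
        (PySem.List.pyRange 0 a.toList.length 1)

-- ===== PRECONDITION & SPEC =====
-- Pre_ excludes inputs with len(a) > len(b): on almost all of them A raises IndexError at b[l];
-- on the few where a repeated mismatching character makes A return False before reaching the bad
-- index, B returns False as well (see cites), so nothing B should have matched is hidden.
def Pre_check (a : String) (b : String) : Prop := a.toList.length ≤ b.toList.length
instance (a : String) (b : String) : Decidable (Pre_check a b) := by unfold Pre_check; infer_instance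
def pvWitness_check : String × String := ("paper", "title")

def Spec_check (a : String) (b : String) (out : Bool) : Prop := out = check_alt a b
instance (a : String) (b : String) (out : Bool) : Decidable (Spec_check a b out) := by unfold Spec_check; infer_instance

-- ===== CLAIM (what is proved, stated in full; the proofs are below) =====
def Claim_equal_check : Prop := ∀ (a : String) (b : String), Dom_check a b → Pre_check a b → Spec_check a b (check a b)

-- ===== LEMMAS AND PROOFS =====

-- str.replace with single-character old/new is a character map
theorem replace_go_singleton (o n : Char) :
    ∀ (l : List Char) (fuel : Nat) (acc : List Char), l.length ≤ fuel →
    PySem.Chars.replace.go [o] [n] fuel l acc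
      = acc.reverse ++ l.map (fun c => if c = o then n else c) := by
  intro l
  induction l with
  | nil => intro fuel acc _; cases fuel <;> simp [PySem.Chars.replace.go]
  | cons c t ih =>
      intro fuel acc hf
      cases fuel with
      | zero => simp at hf
      | succ m =>
        simp only [PySem.Chars.replace.go, List.isPrefixOf, List.map]
        by_cases hc : c = o
        · rw [if_pos (by simp [hc]), if_pos hc,
              show List.drop [o].length (c :: t) = t from rfl,
              ih m _ (by simpa using hf)]
          simp
        · rw [if_neg (by simp [Ne.symm hc]), if_neg hc, ih m _ (by simpa using hf)]
          simp

theorem replace_singleton (s : List Char) (o n : Char) :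
    PySem.Chars.replace s [o] [n] = s.map (fun c => if c = o then n else c) := by
  simp only [PySem.Chars.replace, List.isEmpty, Bool.false_eq_true, if_false]
  exact replace_go_singleton o n s s.length [] le_rfl

-- xs[i] commutes with mapping a function over xs
theorem pyGet?_map (g : Char → Char) (xs : List Char) (i : Int) :
    PySem.List.pyGet? (xs.map g) i = (PySem.List.pyGet? xs i).map g := by
  simp only [PySem.List.pyGet?, List.length_map]
  cases PySem.List.pyIdx? xs.length i <;> simp [List.getElem?_map]

-- (a == b.map g) computed positionwise, as B's final zip check does
theorem eq_map_zip (g : Char → Char) :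
    ∀ (a b : List Char),
      (a == b.map g) = (a.length == b.length && (a.zip b).all (fun p => g p.2 == p.1)) := by
  intro a
  induction a with
  | nil => intro b; cases b <;> simp
  | cons x xs ih =>
      intro b
      cases b with
      | nil => simp
      | cons y ys =>
        simp only [List.map, List.zip_cons_cons, List.all_cons, List.cons_beq_cons,
          List.length_cons]
        rw [ih ys]
        by_cases h1 : x = g y
        · simp [h1]
        · have e1 : (x == g y) = false := by simp [h1]
          have e2 : (g y == x) = false := by
            simp only [beq_eq_false_iff_ne, ne_eq]; exact fun h => h1 h.symm
          simp [e1, e2]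

-- a root (non-key of parent) is returned untouched, whatever the fuel
theorem findFuel_succ (n : Nat) (p : PySem.Dict Char Char) (c : Char) :
    findFuel (n+1) p c = if p.getD c c = c then c else findFuel n p (p.getD c c) := rfl

theorem findFuel_of_root (p : PySem.Dict Char Char) (c : Char) (hc : p.get? c = none) :
    ∀ n, findFuel n p c = c := by
  intro n
  cases n with
  | zero => rfl
  | succ m => rw [findFuel_succ, if_pos (PySem.Dict.getD_of_get?_eq_none _ _ hc)]

-- after adding the edge r → t, a root d of parent resolves to t if d = r, else to itself
theorem findFuel_insert_root (p : PySem.Dict Char Char) (r t : Char)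
    (ht : p.get? t = none) (htr : t ≠ r) (d : Char) (hd : p.get? d = none) :
    ∀ m, findFuel (m+1) (p.insert r t) d = if d = r then t else d := by
  intro m
  have hp't : (p.insert r t).get? t = none := by
    rw [PySem.Dict.get?_insert, if_neg htr]; exact ht
  by_cases hdr : d = r
  · subst hdr
    have h1 : (p.insert d t).getD d d = t := by
      rw [PySem.Dict.getD_insert]; simp
    rw [findFuel_succ, h1, if_neg htr, if_pos rfl]
    exact findFuel_of_root _ _ hp't m
  · have h1 : (p.insert r t).getD d d = d := by
      rw [PySem.Dict.getD_insert, if_neg hdr]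
      exact PySem.Dict.getD_of_get?_eq_none _ _ hd
    rw [findFuel_succ, if_pos h1, if_neg hdr]

-- adding the edge r → t (r, t roots, t ≠ r) redirects exactly the chains that ended at r
theorem findFuel_insert (p : PySem.Dict Char Char) (r t : Char)
    (hr : p.get? r = none) (ht : p.get? t = none) (htr : t ≠ r) :
    ∀ (n : Nat) (c : Char), p.get? (findFuel (n+1) p c) = none →
      findFuel (n+2) (p.insert r t) c
        = (if findFuel (n+1) p c = r then t else findFuel (n+1) p c) := by
  have hgr : p.getD r r = r := PySem.Dict.getD_of_get?_eq_none _ _ hr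
  intro n
  induction n with
  | zero =>
      intro c hroot
      by_cases hc : p.getD c c = c
      · rw [show findFuel (0+1) p c = c by rw [findFuel_succ, if_pos hc]] at hroot ⊢
        exact findFuel_insert_root p r t ht htr c hroot 1
      · have h1 : findFuel (0+1) p c = p.getD c c := by
          rw [findFuel_succ, if_neg hc]; rfl
        rw [h1] at hroot ⊢
        have hcr : c ≠ r := fun h => hc (by rw [h, hgr])
        have h2 : (0:Nat)+2 = 1+1 := rfl
        rw [h2, findFuel_succ,
          show (p.insert r t).getD c c = p.getD c c by rw [PySem.Dict.getD_insert, if_neg hcr],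
          if_neg hc]
        exact findFuel_insert_root p r t ht htr (p.getD c c) hroot 0
  | succ m ih =>
      intro c hroot
      by_cases hc : p.getD c c = c
      · rw [show findFuel (m+1+1) p c = c by rw [findFuel_succ, if_pos hc]] at hroot ⊢
        have h2 : m+1+2 = (m+2)+1 := rfl
        rw [h2]
        exact findFuel_insert_root p r t ht htr c hroot (m+2)
      · have h1 : findFuel (m+1+1) p c = findFuel (m+1) p (p.getD c c) := by
          rw [findFuel_succ, if_neg hc]
        rw [h1] at hroot ⊢
        have hcr : c ≠ r := fun h => hc (by rw [h, hgr])
        have h2 : m+1+2 = (m+2)+1 := rfl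
        rw [h2, findFuel_succ,
          show (p.insert r t).getD c c = p.getD c c by rw [PySem.Dict.getD_insert, if_neg hcr],
          if_neg hc]
        exact ih (p.getD c c) hroot

-- the abstraction invariant: ρ is the root map, M c the letter currently shown by c's class
structure UFInv (parent val : PySem.Dict Char Char) (owner : PySem.Dict Char (Option Char))
    (M ρ : Char → Char) : Prop where
  fuel : ∀ c, findFuel (parent.size + 1) parent c = ρ c
  root : ∀ c, parent.get? (ρ c) = none
  value : ∀ c, M c = val.getD (ρ c) (ρ c)
  inj : ∀ c d, M c = M d → ρ c = ρ d
  extinct : ∀ v, owner.getD v (some v) = none → ∀ c, M c ≠ v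
  own : ∀ v t, owner.getD v (some v) = some t → ρ t = t ∧ val.getD t t = v

theorem inv_find {parent val owner M ρ} (h : UFInv parent val owner M ρ) (c : Char) :
    ufFind parent c = ρ c := h.fuel c

theorem inv_rho_idem {parent val owner M ρ} (h : UFInv parent val owner M ρ) (c : Char) :
    ρ (ρ c) = ρ c := by
  have := h.fuel (ρ c)
  rw [findFuel_of_root _ _ (h.root c)] at this
  exact this.symm

theorem inv_init : UFInv PySem.Dict.empty PySem.Dict.empty PySem.Dict.empty id id := by
  refine ⟨?_, ?_, ?_, ?_, ?_, ?_⟩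
  · intro c; simp [findFuel, PySem.Dict.getD_empty]
  · intro c; simp [PySem.Dict.get?_empty]
  · intro c; simp [PySem.Dict.getD_empty]
  · intro c d h; exact h
  · intro v hv; simp [PySem.Dict.getD_empty] at hv
  · intro v t hvt
    simp only [PySem.Dict.getD_empty, Option.some.injEq] at hvt
    subst hvt
    exact ⟨rfl, by simp [PySem.Dict.getD_empty]⟩

-- relabel step: no class currently shows 'want', so r's class is just relabelled
theorem inv_step_none {parent val owner M ρ} (h : UFInv parent val owner M ρ)
    (bc want : Char) (hw : want ≠ M bc)
    (hnone : (owner.insert (M bc) none).getD want (some want) = none) :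
    UFInv parent (val.insert (ρ bc) want) ((owner.insert (M bc) none).insert want (some (ρ bc)))
      (fun c => if M c = M bc then want else M c) ρ := by
  have howner : owner.getD want (some want) = none := by
    rwa [PySem.Dict.getD_insert, if_neg hw] at hnone
  have hnw : ∀ c, M c ≠ want := h.extinct want howner
  have hvalr : val.getD (ρ bc) (ρ bc) = M bc := (h.value bc).symm
  refine ⟨h.fuel, h.root, ?_, ?_, ?_, ?_⟩
  · intro c
    rw [PySem.Dict.getD_insert]
    by_cases hc : M c = M bc
    · rw [if_pos hc, if_pos (h.inj c bc hc)]
    · rw [if_neg hc, if_neg (fun he : ρ c = ρ bc => hc (by rw [h.value c, he, hvalr])),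
        ← h.value c]
  · intro c d hcd
    by_cases hc : M c = M bc <;> by_cases hd : M d = M bc
    · rw [h.inj c bc hc, h.inj d bc hd]
    · rw [if_pos hc, if_neg hd] at hcd; exact absurd hcd.symm (hnw d)
    · rw [if_neg hc, if_pos hd] at hcd; exact absurd hcd (hnw c)
    · rw [if_neg hc, if_neg hd] at hcd; exact h.inj c d hcd
  · intro v hv c
    rw [PySem.Dict.getD_insert] at hv
    by_cases hvw : v = want
    · rw [if_pos hvw] at hv; exact absurd hv (by simp)
    · rw [if_neg hvw, PySem.Dict.getD_insert] at hv
      by_cases hvc : v = M bc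
      · subst hvc
        by_cases hc : M c = M bc
        · rw [if_pos hc]; exact hw
        · rw [if_neg hc]; exact hc
      · rw [if_neg hvc] at hv
        have := h.extinct v hv c
        by_cases hc : M c = M bc
        · rw [if_pos hc]; exact fun he => hvw he.symm
        · rw [if_neg hc]; exact this
  · intro v t hvt
    rw [PySem.Dict.getD_insert] at hvt
    by_cases hvw : v = want
    · rw [if_pos hvw] at hvt
      obtain rfl : ρ bc = t := by simpa using hvt
      refine ⟨inv_rho_idem h bc, ?_⟩
      rw [PySem.Dict.getD_insert, if_pos rfl, hvw]
    · rw [if_neg hvw, PySem.Dict.getD_insert] at hvt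
      by_cases hvc : v = M bc
      · rw [if_pos hvc] at hvt; exact absurd hvt (by simp)
      · rw [if_neg hvc] at hvt
        obtain ⟨h1, h2⟩ := h.own v t hvt
        refine ⟨h1, ?_⟩
        rw [PySem.Dict.getD_insert, if_neg (fun he : t = ρ bc => hvc (by rw [← h2, he, hvalr]))]
        exact h2

-- merge step: class t already shows 'want'; r's class is merged into it
theorem inv_step_some {parent val owner M ρ} (h : UFInv parent val owner M ρ)
    (bc want t : Char) (hw : want ≠ M bc)
    (hsome : (owner.insert (M bc) none).getD want (some want) = some t) :
    UFInv (parent.insert (ρ bc) t) val ((owner.insert (M bc) none).insert want (some t))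
      (fun c => if M c = M bc then want else M c)
      (fun c => if ρ c = ρ bc then t else ρ c) := by
  have howner : owner.getD want (some want) = some t := by
    rwa [PySem.Dict.getD_insert, if_neg hw] at hsome
  obtain ⟨hroot_t, hval_t⟩ := h.own want t howner
  have hvalr : val.getD (ρ bc) (ρ bc) = M bc := (h.value bc).symm
  have htr : t ≠ ρ bc := fun he => hw (by rw [← hval_t, he, hvalr])
  have hMt : M t = want := by rw [h.value t, hroot_t, hval_t]
  have hclass : ∀ c, M c = want → ρ c = t := by
    intro c hc
    rw [h.inj c t (by rw [hc, hMt]), hroot_t]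
  have hrget : parent.get? (ρ bc) = none := h.root bc
  have htget : parent.get? t = none := by have := h.root t; rwa [hroot_t] at this
  have hsize : (parent.insert (ρ bc) t).size = parent.size + 1 := by
    rw [PySem.Dict.size_insert, if_neg]
    rw [Bool.not_eq_true, ← PySem.Dict.get?_eq_none_iff_contains]
    exact hrget
  refine ⟨?_, ?_, ?_, ?_, ?_, ?_⟩
  · intro c
    rw [hsize, show parent.size + 1 + 1 = parent.size + 2 from rfl,
      findFuel_insert parent (ρ bc) t hrget htget htr parent.size c
        (by rw [h.fuel c]; exact h.root c), h.fuel c]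
  · intro c
    rw [PySem.Dict.get?_insert]
    by_cases hc : ρ c = ρ bc
    · rw [if_pos hc, if_neg htr]; exact htget
    · rw [if_neg hc, if_neg hc]; exact h.root c
  · intro c
    by_cases hc : M c = M bc
    · rw [if_pos hc, if_pos (h.inj c bc hc), hval_t]
    · rw [if_neg hc, if_neg (fun he : ρ c = ρ bc => hc (by rw [h.value c, he, hvalr])),
        ← h.value c]
  · intro c d hcd
    by_cases hc : M c = M bc <;> by_cases hd : M d = M bc
    · rw [if_pos (h.inj c bc hc), if_pos (h.inj d bc hd)]
    · rw [if_pos hc, if_neg hd] at hcd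
      rw [if_pos (h.inj c bc hc), if_neg (fun he : ρ d = ρ bc => hd (by rw [h.value d, he, hvalr])),
        hclass d hcd.symm]
    · rw [if_neg hc, if_pos hd] at hcd
      rw [if_pos (h.inj d bc hd), if_neg (fun he : ρ c = ρ bc => hc (by rw [h.value c, he, hvalr])),
        hclass c hcd]
    · rw [if_neg hc, if_neg hd] at hcd
      rw [h.inj c d hcd]
  · intro v hv c
    rw [PySem.Dict.getD_insert] at hv
    by_cases hvw : v = want
    · rw [if_pos hvw] at hv; exact absurd hv (by simp)
    · rw [if_neg hvw, PySem.Dict.getD_insert] at hv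
      by_cases hvc : v = M bc
      · subst hvc
        by_cases hc : M c = M bc
        · rw [if_pos hc]; exact hw
        · rw [if_neg hc]; exact hc
      · rw [if_neg hvc] at hv
        have := h.extinct v hv c
        by_cases hc : M c = M bc
        · rw [if_pos hc]; exact fun he => hvw he.symm
        · rw [if_neg hc]; exact this
  · intro v t' hvt
    rw [PySem.Dict.getD_insert] at hvt
    by_cases hvw : v = want
    · rw [if_pos hvw] at hvt
      obtain rfl : t = t' := by simpa using hvt
      exact ⟨by rw [hroot_t, if_neg htr], by rw [hval_t, hvw]⟩
    · rw [if_neg hvw, PySem.Dict.getD_insert] at hvt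
      by_cases hvc : v = M bc
      · rw [if_pos hvc] at hvt; exact absurd hvt (by simp)
      · rw [if_neg hvc] at hvt
        obtain ⟨h1, h2⟩ := h.own v t' hvt
        have ht'r : t' ≠ ρ bc := fun he => hvc (by rw [← h2, he, hvalr])
        exact ⟨by rw [h1, if_neg ht'r], h2⟩

-- first-occurrence fold characterised
theorem firstAux :
    ∀ (l : List Char) (s : Int) (d : PySem.Dict Char Int) (c : Char),
      ((PySem.List.enumerate l s).foldl
          (fun d p => if d.contains p.2 then d else d.insert p.2 p.1) d).get? c
        = if d.contains c then d.get? c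
          else (if c ∈ l then some (s + (l.idxOf c : Int)) else none) := by
  intro l
  induction l with
  | nil =>
      intro s d c
      simp [PySem.List.enumerate, PySem.Dict.get?_eq_none_iff_contains]
  | cons x xs ih =>
      intro s d c
      rw [PySem.List.enumerate_cons]
      simp only [List.foldl_cons]
      by_cases hx : d.contains x
      · rw [if_pos hx, ih]
        by_cases hc : d.contains c
        · simp [hc]
        · rw [if_neg hc, if_neg hc]
          have hcx : c ≠ x := fun he => hc (he ▸ hx)
          by_cases hm : c ∈ xs
          · rw [if_pos hm, if_pos (List.mem_cons_of_mem _ hm),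
              List.idxOf_cons_ne _ (fun he => hcx he.symm)]
            push_cast; ring_nf
          · rw [if_neg hm, if_neg (by simp [hcx, hm])]
      · rw [if_neg hx, ih]
        by_cases hcx : c = x
        · subst hcx
          rw [if_pos (PySem.Dict.contains_insert_self _ _ _), PySem.Dict.get?_insert_self,
            if_neg hx, if_pos (List.mem_cons_self), List.idxOf_cons_self]
          simp
        · have h1 : (d.insert x s).contains c = d.contains c := by
            rw [PySem.Dict.contains_insert]
            simp [hcx]
          rw [h1]
          by_cases hc : d.contains c
          · rw [if_pos hc, if_pos hc, PySem.Dict.get?_insert, if_neg hcx]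
          · rw [if_neg hc, if_neg hc]
            by_cases hm : c ∈ xs
            · rw [if_pos hm, if_pos (List.mem_cons_of_mem _ hm),
                List.idxOf_cons_ne _ (fun he => hcx he.symm)]
              push_cast; ring_nf
            · rw [if_neg hm, if_neg (by simp [hcx, hm])]

theorem firstDict_spec (a : List Char) (k : Nat) (hk : k < a.length) :
    (firstDict a).get? a[k] = some ((a.idxOf a[k] : Int)) := by
  rw [firstDict, firstAux a 0 PySem.Dict.empty a[k], if_neg (by simp [PySem.Dict.contains_empty]),
    if_pos (a.getElem_mem hk)]
  simp

theorem mem_take_iff_idxOf_lt :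
    ∀ (l : List Char) (x : Char), x ∈ l → ∀ n : Nat, (x ∈ l.take n ↔ l.idxOf x < n) := by
  intro l
  induction l with
  | nil => intro x hx; simp at hx
  | cons y ys ih =>
      intro x hx n
      cases n with
      | zero => simp
      | succ m =>
          by_cases hxy : x = y
          · subst hxy
            simp [List.idxOf_cons_self]
          · rw [List.take_succ_cons, List.idxOf_cons_ne _ (fun he => hxy he.symm)]
            have hx' : x ∈ ys := by
              rcases List.mem_cons.1 hx with h | h
              · exact absurd h hxy
              · exact h
            rw [List.mem_cons]
            constructor
            · intro h
              rcases h with h | h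
              · exact absurd h hxy
              · exact Nat.succ_lt_succ ((ih x hx' m).1 h)
            · intro h
              exact Or.inr ((ih x hx' m).2 (Nat.lt_of_succ_lt_succ h))

-- the seen-dict invariant: d's keys are exactly the letters of the processed prefix of a
theorem seen_step (a : List Char) (k : Nat) (hk : k < a.length) (d : PySem.Dict Char Int)
    (hseen : ∀ x, (d.getD x 0 == 0) = !(decide (x ∈ a.take k))) :
    ∀ x, ((d.insert a[k] 1).getD x 0 == 0) = !(decide (x ∈ a.take (k+1))) := by
  intro x
  have htake : a.take (k+1) = a.take k ++ [a[k]] := by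
    rw [List.take_add_one, List.getElem?_eq_getElem hk]
    rfl
  rw [PySem.Dict.getD_insert]
  by_cases hx : x = a[k]
  · subst hx
    have hmem : a[k] ∈ a.take (k+1) := by
      rw [htake]; exact List.mem_append_right _ (List.mem_singleton_self a[k])
    rw [if_pos rfl]
    simp [hmem]
  · have hiff : (x ∈ a.take (k+1)) ↔ (x ∈ a.take k) := by
      rw [htake]; simp only [List.mem_append, List.mem_singleton, hx, or_false]
    rw [if_neg hx, hseen x]
    simp [hiff]

-- when the lengths differ A always returns False (replace preserves length)
theorem checkGo_false (a : List Char) :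
    ∀ (ls : List Int) (b' : List Char) (d : PySem.Dict Char Int),
      a.length ≠ b'.length → checkGo a b' d ls = false := by
  intro ls
  induction ls with
  | nil =>
      intro b' d hne
      rw [checkGo, beq_eq_false_iff_ne]
      exact fun he => hne (by rw [he])
  | cons l rest ih =>
      intro b' d hne
      rw [checkGo]
      cases PySem.List.pyGet? a l with
      | none => rfl
      | some ca =>
        cases PySem.List.pyGet? b' l with
        | none => rfl
        | some cb =>
          by_cases hca : ca = cb
          · simp only [hca, ne_eq, not_true_eq_false, if_false]
            exact ih b' _ hne
          · simp only [ne_eq, hca, not_false_eq_true, if_true]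
            by_cases hd : (d.getD ca 0 == 0) = true
            · rw [if_pos hd, replace_singleton]
              exact ih _ _ (by simpa using hne)
            · rw [if_neg hd]
          
-- main loop invariant: A run on the rewritten string = B run with the union-find state
theorem loop_eq (a b0 : List Char) (hlen : a.length = b0.length) :
    ∀ (n k : Nat), a.length - k = n →
      ∀ (parent val : PySem.Dict Char Char) (owner : PySem.Dict Char (Option Char))
        (M ρ : Char → Char) (d : PySem.Dict Char Int),
        UFInv parent val owner M ρ →
        (∀ x, (d.getD x 0 == 0) = !(decide (x ∈ a.take k))) →
        checkGo a (b0.map M) d (PySem.List.pyRange (k : Int) (a.length : Int)) =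
          altGo a b0 (firstDict a) parent val owner (PySem.List.pyRange (k : Int) (a.length : Int)) := by
  intro n
  induction n with
  | zero =>
      intro k hk parent val owner M ρ d hinv _
      have hk' : a.length ≤ k := by omega
      rw [PySem.List.pyRange_one_eq_nil (by exact_mod_cast hk'), checkGo, altGo, eq_map_zip]
      have h1 : (a.length == b0.length) = true := by
        simp [hlen]
      rw [h1, Bool.true_and]
      have h2 : (fun (p : Char × Char) => val.getD (ufFind parent p.2) (ufFind parent p.2) == p.1)
          = fun p => M p.2 == p.1 := by
        funext p
        rw [inv_find hinv, ← hinv.value]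
      rw [h2]
  | succ n ih =>
      intro k hk parent val owner M ρ d hinv hseen
      have hklt : k < a.length := by omega
      have hklt' : k < b0.length := by omega
      rw [PySem.List.pyRange_one_cons (by exact_mod_cast hklt), checkGo, altGo]
      have hga : PySem.List.pyGet? a (k : Int) = some a[k] := by
        rw [PySem.List.pyGet?_natCast, List.getElem?_eq_getElem hklt]
      have hgb : PySem.List.pyGet? b0 (k : Int) = some b0[k] := by
        rw [PySem.List.pyGet?_natCast, List.getElem?_eq_getElem hklt']
      have hgbm : PySem.List.pyGet? (b0.map M) (k : Int) = some (M b0[k]) := by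
        rw [pyGet?_map, hgb]; rfl
      rw [hga, hgb, hgbm]
      simp only
      have hfind : val.getD (ufFind parent b0[k]) (ufFind parent b0[k]) = M b0[k] := by
        rw [inv_find hinv, ← hinv.value]
      have hcast : ((k : Int) + 1) = ((k + 1 : Nat) : Int) := by push_cast; ring
      by_cases hmatch : a[k] = M b0[k]
      · rw [if_neg (not_not_intro hmatch), hfind, if_pos hmatch.symm, hcast]
        exact ih (k+1) (by omega) parent val owner M ρ _ hinv
          (seen_step a k hklt d hseen)
      · have hne2 : ¬ (M b0[k] = a[k]) := fun he => hmatch he.symm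
        rw [if_pos hmatch, hfind, if_neg hne2, hseen a[k], firstDict_spec a k hklt]
        by_cases hin : a[k] ∈ a.take k
        · have hidx : ((a.idxOf a[k] : Int) < (k : Int)) := by
            exact_mod_cast (mem_take_iff_idxOf_lt a a[k] (a.getElem_mem hklt) k).1 hin
          simp [hin, hidx]
        · have hidx : ¬ ((a.idxOf a[k] : Int) < (k : Int)) := by
            intro hc
            exact hin ((mem_take_iff_idxOf_lt a a[k] (a.getElem_mem hklt) k).2 (by exact_mod_cast hc))
          simp only [hin, decide_false, Bool.not_false, if_true, hidx, if_false]
          rw [replace_singleton, List.map_map]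
          have hmapM : (fun c => if c = M b0[k] then a[k] else c) ∘ M
              = fun c => if M c = M b0[k] then a[k] else M c := rfl
          rw [hmapM, hcast]
          rcases hcase : (owner.insert (M b0[k]) none).getD a[k] (some a[k]) with _ | t
          · exact ih (k+1) (by omega) parent _ _ _ ρ _
              (by
                have := inv_step_none hinv b0[k] a[k] hmatch hcase
                rwa [← inv_find hinv] at this)
              (seen_step a k hklt d hseen)
          · exact ih (k+1) (by omega) _ val _ _ _ _
              (by
                have := inv_step_some hinv b0[k] a[k] t hmatch hcase
                rwa [← inv_find hinv] at this)
              (seen_step a k hklt d hseen)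

-- ===== VERDICT (by name: the statement is the Claim_ definition above) =====
theorem check_spec : Claim_equal_check := by
  intro a b _ hpre
  unfold Spec_check check check_alt
  by_cases hlen : a.toList.length = b.toList.length
  · rw [if_neg (not_not_intro hlen)]
    have h := loop_eq a.toList b.toList hlen (a.toList.length - 0) 0 rfl
      PySem.Dict.empty PySem.Dict.empty PySem.Dict.empty id id PySem.Dict.empty
      inv_init (by intro x; simp [PySem.Dict.getD_empty])
    rw [List.map_id] at h
    simpa using h
  · rw [if_pos hlen]
    exact checkGo_false a.toList _ b.toList PySem.Dict.empty hlen
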